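-- pv_equiv track=rewrite | github.com/localparty/integers | paper28-pvnp/clone-growth-fullness-bridge/code/gap_alpha_multislot.py | coordinatewise_threshold_k
-- ===== SOURCE A (Python) =====
-- def coordinatewise_threshold_k(inputs, k):
--     """
--     Coordinatewise threshold-k: output bit i = 1 iff at least ceil(k/2)
--     of the k inputs have bit i = 1. This is the k-ary majority.
--     For 2-SAT, threshold-k is always a polymorphism (preserves 2-SAT
--     constraints for all k >= 3 odd).
--     """
--     n = len(inputs[0])
--     threshold = (k + 1) // 2  # ceil(k/2)
--     result = []
--     for i in range(n):
--         s = sum(inp[i] for inp in inputs)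
--         result.append(1 if s >= threshold else 0)
--     return tuple(result)
-- ===== SOURCE B (Python) =====
-- def coordinatewise_threshold_k(inputs, k):
--     # Row-major accumulation: one pass over the inputs maintaining a running
--     # per-coordinate count, then a single thresholding pass.
--     counts = [0] * len(inputs[0])
--     for inp in inputs:
--         counts = [c + b for c, b in zip(counts, inp)]
--     threshold = (k + 1) // 2
--     return tuple(1 if c >= threshold else 0 for c in counts)
-- ===== Notes on version B (the rewrite author's own statement) =====
-- stated objective: alternative
-- what changed: B reverses the loop nesting: instead of recomputing each column sum with an inner scan over all inputs (columns-outer), B makes one row-major pass that folds every input vector into a running counts table via zip, then thresholds the table in a single final pass.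
import Mathlib
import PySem

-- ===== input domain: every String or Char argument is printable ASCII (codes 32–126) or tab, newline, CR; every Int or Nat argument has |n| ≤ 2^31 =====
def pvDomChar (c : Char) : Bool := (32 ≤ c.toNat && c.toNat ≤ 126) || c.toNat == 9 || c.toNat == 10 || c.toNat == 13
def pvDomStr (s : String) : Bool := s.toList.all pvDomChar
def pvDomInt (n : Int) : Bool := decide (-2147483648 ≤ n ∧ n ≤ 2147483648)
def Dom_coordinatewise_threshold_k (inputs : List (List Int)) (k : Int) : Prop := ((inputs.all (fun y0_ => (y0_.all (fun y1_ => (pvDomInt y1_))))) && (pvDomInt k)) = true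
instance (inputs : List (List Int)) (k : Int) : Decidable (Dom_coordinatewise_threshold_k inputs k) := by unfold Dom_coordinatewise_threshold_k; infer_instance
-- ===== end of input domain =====

-- B replaces A's columns-outer nested scan by a single row-major accumulation pass
-- followed by one thresholding pass (alternative decomposition, same cost).

-- ===== PORT A =====
def coordinatewise_threshold_k (inputs : List (List Int)) (k : Int) : List Int :=
  let n : Int := ((inputs.headD []).length : Int)   -- len(inputs[0]); Pre_ guarantees inputs ≠ []
  let threshold : Int := PySem.Int.floordiv (k + 1) 2
  (PySem.List.pyRange 0 n 1).foldl
    (fun result i =>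
      result ++ [if (inputs.foldl (fun s inp => s + PySem.List.pyGetD inp i 0) 0) ≥ threshold
                 then (1 : Int) else 0])
    []

-- ===== PORT B =====
def coordinatewise_threshold_k_alt (inputs : List (List Int)) (k : Int) : List Int :=
  let counts : List Int :=
    inputs.foldl (fun cs inp => (cs.zip inp).map (fun p => p.1 + p.2))
      (List.replicate (inputs.headD []).length (0 : Int))
  let threshold : Int := PySem.Int.floordiv (k + 1) 2
  counts.map (fun c => if c ≥ threshold then (1 : Int) else 0)

-- ===== PRECONDITION & SPEC =====
-- Pre_ excludes exactly the inputs where A raises IndexError: an empty inputs list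
-- (inputs[0]) or some row shorter than the first row (inp[i] inside the sum).
def Pre_coordinatewise_threshold_k (inputs : List (List Int)) (k : Int) : Prop :=
  inputs ≠ [] ∧ ∀ r ∈ inputs, (inputs.headD []).length ≤ r.length
instance (inputs : List (List Int)) (k : Int) : Decidable (Pre_coordinatewise_threshold_k inputs k) := by unfold Pre_coordinatewise_threshold_k; infer_instance

def pvWitness_coordinatewise_threshold_k : List (List Int) × Int := ([[1, 0, 1], [0, 0, 1], [1, 1, 1]], 3)

def Spec_coordinatewise_threshold_k (inputs : List (List Int)) (k : Int) (out : List Int) : Prop := out = coordinatewise_threshold_k_alt inputs k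
instance (inputs : List (List Int)) (k : Int) (out : List Int) : Decidable (Spec_coordinatewise_threshold_k inputs k out) := by unfold Spec_coordinatewise_threshold_k; infer_instance

-- ===== CLAIM (what is proved, stated in full; the proofs are below) =====
def Claim_equal_coordinatewise_threshold_k : Prop := ∀ (inputs : List (List Int)) (k : Int), Dom_coordinatewise_threshold_k inputs k → Pre_coordinatewise_threshold_k inputs k → Spec_coordinatewise_threshold_k inputs k (coordinatewise_threshold_k inputs k)

-- ===== LEMMAS AND PROOFS =====

/-- Column sum at coordinate `i`. -/
def pvColsum (rows : List (List Int)) (i : Nat) : Int :=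
  (rows.map (fun r => r.getD i 0)).sum

theorem pvColsum_cons (r : List Int) (rows : List (List Int)) (i : Nat) :
    pvColsum (r :: rows) i = r.getD i 0 + pvColsum rows i := by
  simp [pvColsum]

/-- B's accumulation fold, characterised coordinatewise. -/
theorem pvCountsFold (rows : List (List Int)) :
    ∀ cs : List Int, (∀ r ∈ rows, cs.length ≤ r.length) →
      rows.foldl (fun cs inp => (cs.zip inp).map (fun p => p.1 + p.2)) cs
        = (List.range cs.length).map (fun i => cs.getD i 0 + pvColsum rows i) := by
  induction rows with
  | nil =>
      intro cs _
      simp only [List.foldl_nil, pvColsum, List.map_nil, List.sum_nil, add_zero]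
      apply List.ext_getElem (by simp)
      intro i h1 h2
      simp [List.getD_eq_getElem?_getD, List.getElem?_eq_getElem h1]
  | cons r rows ih =>
      intro cs h
      have hr : cs.length ≤ r.length := h r (by simp)
      have hlen : ((cs.zip r).map (fun p : Int × Int => p.1 + p.2)).length = cs.length := by
        simp [Nat.min_eq_left hr]
      rw [List.foldl_cons, ih _ (by intro r' hr'; rw [hlen]; exact h r' (by simp [hr']))]
      rw [hlen]
      apply List.map_congr_left
      intro i hi
      have hi' : i < cs.length := List.mem_range.mp hi
      have hzip : ((cs.zip r).map (fun p : Int × Int => p.1 + p.2)).getD i 0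
          = cs.getD i 0 + r.getD i 0 := by
        have hir : i < r.length := lt_of_lt_of_le hi' hr
        rw [List.getD_eq_getElem?_getD, List.getD_eq_getElem?_getD, List.getD_eq_getElem?_getD]
        simp [hi', hir, Nat.min_eq_left hr]
      rw [hzip, pvColsum_cons, add_assoc]

/-- A's inner sum-loop over the inputs equals the column sum, for an in-range column. -/
theorem pvInnerSum (rows : List (List Int)) (i : Nat) :
    rows.foldl (fun s inp => s + PySem.List.pyGetD inp (i : Int) 0) 0 = pvColsum rows i := by
  rw [PySem.List.foldl_add]
  simp [pvColsum]

-- ===== VERDICT (by name: the statement is the Claim_ definition above) =====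
theorem coordinatewise_threshold_k_spec : Claim_equal_coordinatewise_threshold_k := by
  intro inputs k _ hpre
  unfold Spec_coordinatewise_threshold_k coordinatewise_threshold_k coordinatewise_threshold_k_alt
  obtain ⟨-, hlen⟩ := hpre
  set n := (inputs.headD []).length with hn
  rw [PySem.List.foldl_append_singleton_eq_map, List.nil_append,
    PySem.List.pyRange_zero_natCast, List.map_map,
    pvCountsFold inputs (List.replicate n 0) (by simpa using hlen), List.map_map]
  simp only [List.length_replicate]
  apply List.map_congr_left
  intro i hi
  have h0 : (List.replicate n (0:Int)).getD i 0 = 0 := by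
    simp [List.getD_eq_getElem?_getD, List.getElem?_replicate, List.mem_range.mp hi]
  simp only [Function.comp_apply, pvInnerSum, h0, zero_add]
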